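-- pv_equiv track=rewrite | github.com/underpoom/Data-Structures | Grader/Sorting/somethingDROME.py | check
-- ===== SOURCE A (Python) =====
-- def bubble_de(l):
--     for i in range(len(l)-1,0,-1):
--         for j in range(i):
--             if l[j] < l[j+1]:
--                 l[j],l[j+1] = l[j+1],l[j]
--     return l
--
-- def bubble_in(l):
--     for i in range(len(l)-1,0,-1):
--         for j in range(i):
--             if l[j] > l[j+1]:
--                 l[j],l[j+1] = l[j+1],l[j]
--     return l
--
-- def check(l):
--     lc = []
--     for i in l:
--         if i not in lc:
--             lc.append(i)
--     not_dup = l == lc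
--
--     if l.count(l[0]) == len(l):
--         return "Repdrome"
--     elif l == bubble_in(l.copy()) and not_dup:
--         return  "Metadrome"
--     elif l == bubble_in(l.copy()):
--         return "Plaindrome"
--     elif l == bubble_de(l.copy()) and not_dup:
--         return "Katadrome"
--     elif l == bubble_de(l.copy()):
--         return "Nialpdrome"
--     else:
--         return  "Nondrome"
-- ===== SOURCE B (Python) =====
-- def check(l):
--     first = l[0]
--     if all(x == first for x in l):
--         return "Repdrome"
--     non_dec = inc = non_inc = dec = True
--     for a, b in zip(l, l[1:]):
--         if a > b:
--             non_dec = inc = False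
--         elif a == b:
--             inc = dec = False
--         else:
--             non_inc = dec = False
--     if inc:
--         return "Metadrome"
--     if non_dec:
--         return "Plaindrome"
--     if dec:
--         return "Katadrome"
--     if non_inc:
--         return "Nialpdrome"
--     return "Nondrome"
-- ===== Notes on version B (the rewrite author's own statement) =====
-- stated objective: faster
-- what changed: Replaces the O(n^2) dedup list plus two full bubble-sort-copy-and-compare passes with a single O(n) scan over adjacent pairs maintaining non-decreasing/strictly-increasing/non-increasing/strictly-decreasing flags (plus an all-equal check against the first element), returning by the same priority order.
import Mathlib
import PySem

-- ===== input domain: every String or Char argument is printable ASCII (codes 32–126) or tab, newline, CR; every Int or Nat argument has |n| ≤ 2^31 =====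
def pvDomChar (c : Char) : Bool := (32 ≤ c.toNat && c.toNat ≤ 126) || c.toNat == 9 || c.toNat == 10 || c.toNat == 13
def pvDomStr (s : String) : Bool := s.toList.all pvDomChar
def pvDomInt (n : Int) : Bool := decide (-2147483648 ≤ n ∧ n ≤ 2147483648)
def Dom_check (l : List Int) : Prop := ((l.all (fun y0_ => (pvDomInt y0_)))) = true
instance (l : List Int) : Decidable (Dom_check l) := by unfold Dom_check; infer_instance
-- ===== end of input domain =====

-- B replaces A's dedup list and two bubble-sort-copy-and-compare passes by one scan over adjacent pairs (measured asymptotically faster); A does not mutate its argument (it sorts copies).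

-- ===== PORT A =====
-- inner body: if l[j] > l[j+1]: l[j],l[j+1] = l[j+1],l[j]  (j and j+1 are always in range when called from the loops below, so getD/set are exact)
def pvStepIn (acc : List Int) (j : Nat) : List Int :=
  if acc.getD j 0 > acc.getD (j+1) 0 then (acc.set j (acc.getD (j+1) 0)).set (j+1) (acc.getD j 0)
  else acc

-- for j in range(i): …   (List.range i is exact for range(i), i ≥ 0 here)
def pvOnepassIn (i : Nat) (l : List Int) : List Int := (List.range i).foldl pvStepIn l

-- def bubble_in(l): for i in range(len(l)-1,0,-1): …
def pvBubbleIn (l : List Int) : List Int :=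
  (PySem.List.pyRange ((l.length : Int) - 1) 0 (-1)).foldl (fun acc i => pvOnepassIn i.toNat acc) l

-- bubble_de: identical but swaps on l[j] < l[j+1]
def pvStepDe (acc : List Int) (j : Nat) : List Int :=
  if acc.getD j 0 < acc.getD (j+1) 0 then (acc.set j (acc.getD (j+1) 0)).set (j+1) (acc.getD j 0)
  else acc

def pvOnepassDe (i : Nat) (l : List Int) : List Int := (List.range i).foldl pvStepDe l

def pvBubbleDe (l : List Int) : List Int :=
  (PySem.List.pyRange ((l.length : Int) - 1) 0 (-1)).foldl (fun acc i => pvOnepassDe i.toNat acc) l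

def check (l : List Int) : String :=
  let lc := l.foldl (fun lc i => if i ∈ lc then lc else lc ++ [i]) ([] : List Int)
  let not_dup : Bool := l == lc
  match PySem.List.pyGet? l 0 with
  | none => ""   -- reading the first element raises IndexError on the empty list; excluded by Pre_check
  | some h =>
    if l.count h = l.length then "Repdrome"
    else if l == pvBubbleIn l && not_dup then "Metadrome"
    else if l == pvBubbleIn l then "Plaindrome"
    else if l == pvBubbleDe l && not_dup then "Katadrome"
    else if l == pvBubbleDe l then "Nialpdrome"
    else "Nondrome"

-- ===== PORT B =====
-- one step of B's loop over adjacent pairs (a, b), state (non_dec, inc, non_inc, dec)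
def pvFlagStep (f : Bool × Bool × Bool × Bool) (p : Int × Int) : Bool × Bool × Bool × Bool :=
  if p.1 > p.2 then (false, false, f.2.2.1, f.2.2.2)
  else if p.1 == p.2 then (f.1, false, f.2.2.1, false)
  else (f.1, f.2.1, false, false)

def check_alt (l : List Int) : String :=
  match PySem.List.pyGet? l 0 with
  | none => ""   -- reading the first element raises IndexError on the empty list; excluded by Pre_check
  | some first =>
    if l.all (fun x => x == first) then "Repdrome"
    else
      let fl := (l.zip (l.drop 1)).foldl pvFlagStep (true, true, true, true)
      if fl.2.1 then "Metadrome"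
      else if fl.1 then "Plaindrome"
      else if fl.2.2.2 then "Katadrome"
      else if fl.2.2.1 then "Nialpdrome"
      else "Nondrome"

-- ===== PRECONDITION & SPEC =====
-- Pre_check excludes only the empty list, on which A raises IndexError reading the first element
def Pre_check (l : List Int) : Prop := l ≠ []
instance (l : List Int) : Decidable (Pre_check l) := by unfold Pre_check; infer_instance
def pvWitness_check : List Int := [1, 2]

def Spec_check (l : List Int) (out : String) : Prop := out = check_alt l
instance (l : List Int) (out : String) : Decidable (Spec_check l out) := by unfold Spec_check; infer_instance

-- ===== CLAIM (what is proved, stated in full; the proofs are below) =====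
def Claim_equal_check : Prop := ∀ (l : List Int), Dom_check l → Pre_check l → Spec_check l (check l)

-- ===== LEMMAS AND PROOFS =====

-- ---- generic getD-of-set facts ----
theorem pvGetD_set (l : List Int) (j m : Nat) (v : Int) :
    (l.set j v).getD m 0 = if m = j ∧ j < l.length then v else l.getD m 0 := by
  by_cases hm : m = j
  · subst hm
    by_cases hj : m < l.length
    · rw [if_pos ⟨rfl, hj⟩]
      simp [List.getD_eq_getElem?_getD, hj]
    · rw [if_neg (by tauto), List.set_eq_of_length_le (by omega)]
  · rw [if_neg (by tauto)]
    simp [List.getD_eq_getElem?_getD, Ne.symm hm]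

theorem pvGetD_swap (acc : List Int) (t : Nat) (ht : t + 1 < acc.length) (m : Nat) :
    ((acc.set t (acc.getD (t+1) 0)).set (t+1) (acc.getD t 0)).getD m 0 =
      if m = t + 1 then acc.getD t 0 else if m = t then acc.getD (t+1) 0 else acc.getD m 0 := by
  rw [pvGetD_set, pvGetD_set]
  simp only [List.length_set]
  split_ifs with h1 h2 h3 h4 <;> first | rfl | omega

-- ---- the ascending bubble sort sorts, and is the identity on sorted lists ----

-- 'position k dominates every earlier position, for every k ≥ i'
def pvP (i : Nat) (l : List Int) : Prop :=
  ∀ k m : Nat, i ≤ k → k < l.length → m ≤ k → l.getD m 0 ≤ l.getD k 0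

theorem pvInnerInv (l : List Int) (i : Nat) (hi : i < l.length) (hP : pvP (i+1) l) :
    ∀ t, t ≤ i →
      (((List.range t).foldl pvStepIn l).length = l.length ∧
       (∀ m : Nat, t < m → ((List.range t).foldl pvStepIn l).getD m 0 = l.getD m 0)) ∧
      ((∀ m : Nat, m ≤ t → ((List.range t).foldl pvStepIn l).getD m 0 ≤ ((List.range t).foldl pvStepIn l).getD t 0) ∧
       (∀ m : Nat, m ≤ t → ∀ k : Nat, i < k → k < l.length → ((List.range t).foldl pvStepIn l).getD m 0 ≤ l.getD k 0)) := by
  intro t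
  induction t with
  | zero =>
    intro _
    refine ⟨⟨rfl, fun m _ => rfl⟩, ?_, ?_⟩
    · intro m hm
      have hm0 : m = 0 := by omega
      subst hm0; exact le_refl _
    · intro m hm k hk hkn
      have hm0 : m = 0 := by omega
      subst hm0
      exact hP k 0 (by omega) hkn (by omega)
  | succ t IH =>
    intro ht1
    obtain ⟨⟨hlen, hup⟩, hdom, hbnd⟩ := IH (by omega)
    set acc := (List.range t).foldl pvStepIn l with hacc
    have hfold : (List.range (t+1)).foldl pvStepIn l = pvStepIn acc t := by
      rw [List.range_succ, List.foldl_append, List.foldl_cons, List.foldl_nil]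
    have htn : t + 1 < l.length := by omega
    have htn' : t + 1 < acc.length := by omega
    have hat1 : acc.getD (t+1) 0 = l.getD (t+1) 0 := hup (t+1) (by omega)
    rw [hfold]
    unfold pvStepIn
    by_cases hc : acc.getD t 0 > acc.getD (t+1) 0
    · rw [if_pos hc]
      refine ⟨⟨by simp [hlen], ?_⟩, ?_, ?_⟩
      · intro m hm
        rw [pvGetD_swap acc t htn' m, if_neg (by omega), if_neg (by omega)]
        exact hup m (by omega)
      · intro m hm
        rw [pvGetD_swap acc t htn' m, pvGetD_swap acc t htn' (t+1), if_pos rfl]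
        by_cases h1 : m = t + 1
        · rw [if_pos h1]
        · rw [if_neg h1]
          by_cases h2 : m = t
          · rw [if_pos h2]; exact le_of_lt hc
          · rw [if_neg h2]; exact hdom m (by omega)
      · intro m hm k hk hkn
        rw [pvGetD_swap acc t htn' m]
        by_cases h1 : m = t + 1
        · rw [if_pos h1]; exact hbnd t (le_refl t) k hk hkn
        · rw [if_neg h1]
          by_cases h2 : m = t
          · rw [if_pos h2, hat1]; exact hP k (t+1) (by omega) hkn (by omega)
          · rw [if_neg h2]; exact hbnd m (by omega) k hk hkn
    · rw [if_neg hc]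
      push Not at hc
      refine ⟨⟨hlen, ?_⟩, ?_, ?_⟩
      · intro m hm; exact hup m (by omega)
      · intro m hm
        by_cases h1 : m = t + 1
        · subst h1; exact le_refl _
        · exact le_trans (hdom m (by omega)) hc
      · intro m hm k hk hkn
        by_cases h1 : m = t + 1
        · subst h1; rw [hat1]; exact hP k (t+1) (by omega) hkn (by omega)
        · exact hbnd m (by omega) k hk hkn

theorem pvOnepass_P (l : List Int) (i : Nat) (hi : i < l.length) (hP : pvP (i+1) l) :
    (pvOnepassIn i l).length = l.length ∧ pvP i (pvOnepassIn i l) := by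
  obtain ⟨⟨hlen, hup⟩, hdom, hbnd⟩ := pvInnerInv l i hi hP i (le_refl i)
  refine ⟨hlen, ?_⟩
  intro k m hk hkn hmk
  unfold pvOnepassIn at *
  have hkn' : k < l.length := by omega
  by_cases hik : k = i
  · subst hik; exact hdom m hmk
  · have hki : i < k := by omega
    rw [hup k (by omega)]
    by_cases hmi : m ≤ i
    · exact hbnd m hmi k hki hkn'
    · rw [hup m (by omega)]
      exact hP k m (by omega) hkn' hmk

theorem pvOuter (n : Nat) : ∀ (t : Nat) (acc : List Int), acc.length = n → t < n → pvP (t+1) acc →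
    ((PySem.List.pyRange (t : Int) 0 (-1)).foldl (fun cur i => pvOnepassIn i.toNat cur) acc).length = n ∧
    pvP 1 ((PySem.List.pyRange (t : Int) 0 (-1)).foldl (fun cur i => pvOnepassIn i.toNat cur) acc) := by
  intro t
  induction t with
  | zero =>
    intro acc hlen htn hP0
    rw [show ((0:Nat):Int) = 0 from rfl, PySem.List.pyRange_neg_one_eq_nil (by omega), List.foldl_nil]
    exact ⟨hlen, hP0⟩
  | succ t IH =>
    intro acc hlen htn hPacc
    rw [PySem.List.pyRange_neg_one_cons (by exact_mod_cast Nat.cast_pos.mpr (Nat.succ_pos t)), List.foldl_cons]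
    have hcast : (((t+1:Nat):Int) - 1) = ((t:Nat):Int) := by push_cast; ring
    rw [hcast, show (((t+1:Nat):Int)).toNat = t+1 from Int.toNat_natCast _]
    have h1 := pvOnepass_P acc (t+1) (by omega) hPacc
    exact IH (pvOnepassIn (t+1) acc) (h1.1.trans hlen) (by omega) h1.2

theorem pvBubbleIn_sorted (l : List Int) : List.IsChain (· ≤ ·) (pvBubbleIn l) := by
  unfold pvBubbleIn
  rcases Nat.eq_zero_or_pos l.length with h0 | hpos
  · rw [PySem.List.pyRange_neg_one_eq_nil (by omega), List.foldl_nil]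
    have : l = [] := List.length_eq_zero_iff.mp h0
    subst this; exact List.isChain_nil
  · have hcast : ((l.length : Int) - 1) = ((l.length - 1 : Nat) : Int) := by push_cast [hpos]; omega
    rw [hcast]
    obtain ⟨hlen, hP1⟩ := pvOuter l.length (l.length - 1) l rfl (by omega)
      (by intro k m hk hkn _; omega)
    rw [List.isChain_iff_getElem]
    intro j hj
    have h := hP1 (j+1) j (by omega) (by omega) (by omega)
    rwa [List.getD_eq_getElem _ _ (by omega), List.getD_eq_getElem _ _ (by omega)] at h

theorem pvOnepassIn_id (l : List Int) (hs : List.IsChain (· ≤ ·) l) :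
    ∀ i, i < l.length → pvOnepassIn i l = l := by
  have hadj : ∀ j : Nat, j + 1 < l.length → l.getD j 0 ≤ l.getD (j+1) 0 := by
    intro j hj
    have h := List.isChain_iff_getElem.mp hs j hj
    rwa [List.getD_eq_getElem _ _ (by omega), List.getD_eq_getElem _ _ hj]
  intro i
  induction i with
  | zero => intro _; rfl
  | succ i IH =>
    intro hi
    unfold pvOnepassIn at *
    rw [List.range_succ, List.foldl_append, IH (by omega), List.foldl_cons, List.foldl_nil]
    unfold pvStepIn
    rw [if_neg (by have := hadj i hi; omega)]

theorem pvBubbleIn_fix (l : List Int) (hs : List.IsChain (· ≤ ·) l) : pvBubbleIn l = l := by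
  unfold pvBubbleIn
  have key : ∀ is : List Int, (∀ i ∈ is, 0 < i ∧ i ≤ (l.length : Int) - 1) →
      is.foldl (fun acc i => pvOnepassIn i.toNat acc) l = l := by
    intro is
    induction is with
    | nil => intro _; rfl
    | cons a as IH =>
      intro hmem
      have ha := hmem a List.mem_cons_self
      rw [List.foldl_cons, pvOnepassIn_id l hs a.toNat (by omega)]
      exact IH (fun i hi => hmem i (List.mem_cons_of_mem _ hi))
  exact key _ (fun i hi => PySem.List.mem_pyRange_neg_one.mp hi)

theorem pvBubbleIn_iff (l : List Int) : l = pvBubbleIn l ↔ List.IsChain (· ≤ ·) l := by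
  constructor
  · intro h; rw [h]; exact pvBubbleIn_sorted l
  · intro hs; exact (pvBubbleIn_fix l hs).symm

-- ---- the descending sort is the ascending sort conjugated by negation ----
theorem pvGetD_map_neg (l : List Int) (m : Nat) :
    (l.map (fun x => -x)).getD m 0 = -(l.getD m 0) := by
  simp only [List.getD_eq_getElem?_getD, List.getElem?_map]
  cases h : l[m]? <;> simp

theorem pvStepDe_neg (l : List Int) (j : Nat) :
    pvStepDe (l.map (fun x => -x)) j = (pvStepIn l j).map (fun x => -x) := by
  unfold pvStepDe pvStepIn
  by_cases hc : l.getD j 0 > l.getD (j+1) 0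
  · rw [if_pos (by rw [pvGetD_map_neg, pvGetD_map_neg]; omega), if_pos hc,
      List.map_set, List.map_set, pvGetD_map_neg, pvGetD_map_neg]
  · rw [if_neg (by rw [pvGetD_map_neg, pvGetD_map_neg]; omega), if_neg hc]

theorem pvOnepassDe_neg (i : Nat) (l : List Int) :
    pvOnepassDe i (l.map (fun x => -x)) = (pvOnepassIn i l).map (fun x => -x) := by
  induction i with
  | zero => rfl
  | succ i IH =>
    unfold pvOnepassDe pvOnepassIn at *
    rw [List.range_succ, List.foldl_append, List.foldl_append, IH,
      List.foldl_cons, List.foldl_nil, List.foldl_cons, List.foldl_nil, pvStepDe_neg]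

theorem pvBubbleDe_neg (l : List Int) :
    pvBubbleDe (l.map (fun x => -x)) = (pvBubbleIn l).map (fun x => -x) := by
  unfold pvBubbleDe pvBubbleIn
  rw [List.length_map]
  have key : ∀ (is : List Int) (m : List Int),
      is.foldl (fun acc i => pvOnepassDe i.toNat acc) (m.map (fun x => -x)) =
      (is.foldl (fun acc i => pvOnepassIn i.toNat acc) m).map (fun x => -x) := by
    intro is
    induction is with
    | nil => intro m; rfl
    | cons a as IH =>
      intro m
      rw [List.foldl_cons, List.foldl_cons, pvOnepassDe_neg, IH]
  exact key _ l

theorem pvBubbleDe_iff (l : List Int) : l = pvBubbleDe l ↔ List.IsChain (fun a b => b ≤ a) l := by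
  have hde : pvBubbleDe l = (pvBubbleIn (l.map (fun x => -x))).map (fun x => -x) := by
    conv_lhs => rw [show l = ((l.map (fun x : Int => -x)).map (fun x => -x)) by
      simp [List.map_map]]
    exact pvBubbleDe_neg (l.map (fun x => -x))
  rw [hde]
  constructor
  · intro h
    have h2 : l.map (fun x : Int => -x) = pvBubbleIn (l.map (fun x => -x)) := by
      conv_lhs => rw [h]
      simp [List.map_map]
    have hs := (pvBubbleIn_iff _).mp h2
    rw [List.isChain_map] at hs
    exact hs.imp (fun a b hab => by omega)
  · intro h
    have hs : List.IsChain (· ≤ ·) (l.map (fun x : Int => -x)) := by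
      rw [List.isChain_map]
      exact h.imp (fun a b hab => by omega)
    rw [← (pvBubbleIn_iff _).mpr hs]
    simp [List.map_map]

-- ---- A's dedup loop is the identity exactly on duplicate-free lists ----
def pvDedupGo (seen : List Int) : List Int → List Int
  | [] => []
  | x :: xs => if x ∈ seen then pvDedupGo seen xs else x :: pvDedupGo (seen ++ [x]) xs

theorem pvDedup_fold_eq (xs : List Int) : ∀ seen : List Int,
    xs.foldl (fun lc i => if i ∈ lc then lc else lc ++ [i]) seen = seen ++ pvDedupGo seen xs := by
  induction xs with
  | nil => intro seen; simp [pvDedupGo]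
  | cons x xs IH =>
    intro seen
    simp only [List.foldl_cons, pvDedupGo]
    by_cases hx : x ∈ seen
    · rw [if_pos hx, if_pos hx, IH seen]
    · rw [if_neg hx, if_neg hx, IH (seen ++ [x]), List.append_assoc, List.singleton_append]

theorem pvDedupGo_length (xs : List Int) : ∀ seen, (pvDedupGo seen xs).length ≤ xs.length := by
  induction xs with
  | nil => intro seen; simp [pvDedupGo]
  | cons x xs IH =>
    intro seen
    simp only [pvDedupGo]
    by_cases hx : x ∈ seen
    · rw [if_pos hx]
      exact le_trans (IH seen) (by simp)
    · rw [if_neg hx]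
      simpa using IH (seen ++ [x])

theorem pvDedupGo_eq_self (xs : List Int) : ∀ seen,
    pvDedupGo seen xs = xs ↔ xs.Nodup ∧ ∀ x ∈ xs, x ∉ seen := by
  induction xs with
  | nil => intro seen; simp [pvDedupGo]
  | cons x xs IH =>
    intro seen
    simp only [pvDedupGo]
    by_cases hx : x ∈ seen
    · rw [if_pos hx]
      constructor
      · intro h
        have hl := congrArg List.length h
        have := pvDedupGo_length xs seen
        simp at hl
        omega
      · rintro ⟨-, hmem⟩
        exact absurd hx (hmem x List.mem_cons_self)
    · rw [if_neg hx]
      constructor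
      · intro h
        have h' : pvDedupGo (seen ++ [x]) xs = xs := (List.cons.injEq _ _ _ _ ▸ h).2
        obtain ⟨hnd, hm⟩ := (IH _).mp h'
        refine ⟨List.nodup_cons.mpr ⟨?_, hnd⟩, ?_⟩
        · intro hxin
          have := hm x hxin
          simp at this
        · intro y hy
          rcases List.mem_cons.mp hy with h1 | h1
          · subst h1; exact hx
          · intro hys
            exact (hm y h1) (List.mem_append.mpr (Or.inl hys))
      · rintro ⟨hnd, hm⟩
        obtain ⟨hxxs, hnd'⟩ := List.nodup_cons.mp hnd
        have : pvDedupGo (seen ++ [x]) xs = xs := by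
          refine (IH _).mpr ⟨hnd', ?_⟩
          intro y hy hys
          rcases List.mem_append.mp hys with h1 | h1
          · exact (hm y (List.mem_cons_of_mem _ hy)) h1
          · simp at h1
            subst h1
            exact hxxs hy
        rw [this]

theorem pvDedup_iff (l : List Int) :
    l.foldl (fun lc i => if i ∈ lc then lc else lc ++ [i]) [] = l ↔ l.Nodup := by
  rw [pvDedup_fold_eq l [], List.nil_append, pvDedupGo_eq_self l []]
  simp

-- ---- strict chains = lax chains + no duplicates ----
theorem pvChain_lt_iff (l : List Int) :
    List.IsChain (· ≤ ·) l ∧ l.Nodup ↔ List.IsChain (fun a b : Int => a < b) l := by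
  constructor
  · rintro ⟨hle, hnd⟩
    rw [List.isChain_iff_pairwise] at hle ⊢
    exact (hle.and hnd).imp (fun h => lt_of_le_of_ne h.1 h.2)
  · intro hlt
    have hp : List.Pairwise (fun a b : Int => a < b) l := List.isChain_iff_pairwise.mp hlt
    exact ⟨List.isChain_iff_pairwise.mpr (hp.imp (fun h => le_of_lt h)),
      hp.imp (fun h => ne_of_lt h)⟩

theorem pvChain_gt_iff (l : List Int) :
    List.IsChain (fun a b : Int => b ≤ a) l ∧ l.Nodup ↔ List.IsChain (fun a b : Int => b < a) l := by
  have hinj : Function.Injective (fun x : Int => -x) := fun a b h => by simpa using h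
  have h1 : List.IsChain (fun a b : Int => b ≤ a) l ↔
      List.IsChain (· ≤ ·) (l.map (fun x => -x)) := by
    rw [List.isChain_map]
    exact ⟨fun h => h.imp (fun a b hab => by omega), fun h => h.imp (fun a b hab => by omega)⟩
  have h2 : List.IsChain (fun a b : Int => b < a) l ↔
      List.IsChain (fun a b : Int => a < b) (l.map (fun x => -x)) := by
    rw [List.isChain_map]
    exact ⟨fun h => h.imp (fun a b hab => by omega), fun h => h.imp (fun a b hab => by omega)⟩
  rw [h1, h2, ← List.nodup_map_iff hinj (l := l)]
  exact pvChain_lt_iff _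

-- ---- B's flag fold ----
theorem pvFlagStep_eq (f : Bool × Bool × Bool × Bool) (p : Int × Int) :
    pvFlagStep f p = (f.1 && decide (p.1 ≤ p.2), f.2.1 && decide (p.1 < p.2),
                      f.2.2.1 && decide (p.2 ≤ p.1), f.2.2.2 && decide (p.2 < p.1)) := by
  unfold pvFlagStep
  rcases lt_trichotomy p.1 p.2 with h | h | h
  · rw [if_neg (by omega), if_neg (by simp; omega)]
    simp [h, le_of_lt h, not_le.mpr h]
  · rw [if_neg (by omega), if_pos (by simp [h])]
    simp [h]
  · rw [if_pos h]
    simp [le_of_lt h, not_le.mpr h, not_lt.mpr (le_of_lt h), h]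

theorem pvFlag_fold (ps : List (Int × Int)) : ∀ f : Bool × Bool × Bool × Bool,
    ps.foldl pvFlagStep f = (f.1 && ps.all (fun p => decide (p.1 ≤ p.2)),
                             f.2.1 && ps.all (fun p => decide (p.1 < p.2)),
                             f.2.2.1 && ps.all (fun p => decide (p.2 ≤ p.1)),
                             f.2.2.2 && ps.all (fun p => decide (p.2 < p.1))) := by
  induction ps with
  | nil => intro f; simp
  | cons p ps IH =>
    intro f
    rw [List.foldl_cons, IH (pvFlagStep f p), pvFlagStep_eq]
    simp [Bool.and_assoc]

theorem pvPairs_all_iff (R : Int → Int → Prop) [DecidableRel R] : ∀ l : List Int,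
    ((l.zip (l.drop 1)).all (fun p => decide (R p.1 p.2)) = true) ↔ List.IsChain R l := by
  intro l
  induction l with
  | nil => simp
  | cons a t IH =>
    cases t with
    | nil => simp
    | cons b t' =>
      rw [List.isChain_cons_cons, ← IH]
      simp [List.zip]

-- ===== VERDICT (by name: the statement is the Claim_ definition above) =====
theorem check_spec : Claim_equal_check := by
  unfold Claim_equal_check
  intro l _ hpre
  unfold Spec_check
  cases l with
  | nil => exact absurd rfl hpre
  | cons x xs =>
    simp only [check, check_alt, PySem.List.pyGet?_zero_cons, pvFlag_fold, Bool.true_and]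
    set L := x :: xs with hLdef
    have hEq : (L.all (fun y => y == x) = true) ↔ (L.count x = L.length) := by
      rw [List.all_eq_true, List.count_eq_length]
      constructor
      · intro h b hb; exact (beq_iff_eq.mp (h b hb)).symm
      · intro h b hb; exact beq_iff_eq.mpr (h b hb).symm
    have hLe : ((L == pvBubbleIn L) = true) ↔ List.IsChain (· ≤ ·) L := by
      rw [beq_iff_eq]; exact pvBubbleIn_iff L
    have hGe : ((L == pvBubbleDe L) = true) ↔ List.IsChain (fun a b : Int => b ≤ a) L := by
      rw [beq_iff_eq]; exact pvBubbleDe_iff L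
    have hNd : ((L == L.foldl (fun lc i => if i ∈ lc then lc else lc ++ [i]) []) = true) ↔ L.Nodup := by
      rw [beq_iff_eq]
      constructor
      · intro h; exact (pvDedup_iff L).mp h.symm
      · intro h; exact ((pvDedup_iff L).mpr h).symm
    have hPLe := pvPairs_all_iff (fun a b : Int => a ≤ b) L
    have hPLt := pvPairs_all_iff (fun a b : Int => a < b) L
    have hPGe := pvPairs_all_iff (fun a b : Int => b ≤ a) L
    have hPGt := pvPairs_all_iff (fun a b : Int => b < a) L
    by_cases hE : L.count x = L.length
    · rw [if_pos hE, if_pos (hEq.mpr hE)]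
    · rw [if_neg hE, if_neg (fun h => hE (hEq.mp h))]
      by_cases hle : List.IsChain (· ≤ ·) L
      · by_cases hnd : L.Nodup
        · have hlt := (pvChain_lt_iff L).mp ⟨hle, hnd⟩
          rw [if_pos (by rw [Bool.and_eq_true]; exact ⟨hLe.mpr hle, hNd.mpr hnd⟩),
              if_pos (hPLt.mpr hlt)]
        · have hnlt : ¬ List.IsChain (fun a b : Int => a < b) L :=
            fun h => hnd ((pvChain_lt_iff L).mpr h).2
          rw [if_neg (by rw [Bool.and_eq_true]; rintro ⟨-, h2⟩; exact hnd (hNd.mp h2)),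
              if_pos (hLe.mpr hle),
              if_neg (fun h => hnlt (hPLt.mp h)),
              if_pos (hPLe.mpr hle)]
      · have hnlt : ¬ List.IsChain (fun a b : Int => a < b) L :=
          fun h => hle (h.imp (fun a b hab => le_of_lt hab))
        rw [if_neg (by rw [Bool.and_eq_true]; rintro ⟨h1, -⟩; exact hle (hLe.mp h1)),
            if_neg (fun h => hle (hLe.mp h)),
            if_neg (fun h => hnlt (hPLt.mp h)),
            if_neg (fun h => hle (hPLe.mp h))]
        by_cases hge : List.IsChain (fun a b : Int => b ≤ a) L
        · by_cases hnd : L.Nodup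
          · have hgt := (pvChain_gt_iff L).mp ⟨hge, hnd⟩
            rw [if_pos (by rw [Bool.and_eq_true]; exact ⟨hGe.mpr hge, hNd.mpr hnd⟩),
                if_pos (hPGt.mpr hgt)]
          · have hngt : ¬ List.IsChain (fun a b : Int => b < a) L :=
              fun h => hnd ((pvChain_gt_iff L).mpr h).2
            rw [if_neg (by rw [Bool.and_eq_true]; rintro ⟨-, h2⟩; exact hnd (hNd.mp h2)),
                if_pos (hGe.mpr hge),
                if_neg (fun h => hngt (hPGt.mp h)),
                if_pos (hPGe.mpr hge)]
        · have hngt : ¬ List.IsChain (fun a b : Int => b < a) L :=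
            fun h => hge (h.imp (fun a b hab => le_of_lt hab))
          rw [if_neg (by rw [Bool.and_eq_true]; rintro ⟨h1, -⟩; exact hge (hGe.mp h1)),
              if_neg (fun h => hge (hGe.mp h)),
              if_neg (fun h => hngt (hPGt.mp h)),
              if_neg (fun h => hge (hPGe.mp h))]
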